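-- pv_equiv track=rewrite | github.com/joanroig/nitools | src/processors/kits/old/nbkt_utf16_dump.py | group_consecutive_strings
-- ===== SOURCE A (Python) =====
-- def group_consecutive_strings(strings_with_pos, gap_threshold=8):
--     grouped = []
--     if not strings_with_pos:
--         return grouped
--     strings_with_pos = sorted(strings_with_pos, key=lambda x: x[0])
--     current = [strings_with_pos[0][1]]
--     last_end = strings_with_pos[0][0] + len(strings_with_pos[0][1].encode('utf-16le'))
--     for pos, s in strings_with_pos[1:]:
--         if pos - last_end <= gap_threshold:
--             current.append(s)
--         else:
--             grouped.append(''.join(current))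
--             current = [s]
--         last_end = pos + len(s.encode('utf-16le'))
--     grouped.append(''.join(current))
--     return grouped
-- ===== SOURCE B (Python) =====
-- def group_consecutive_strings(strings_with_pos, gap_threshold=8):
--     items = sorted(strings_with_pos, key=lambda x: x[0])
--     # phase 1: stateless boundary detection over adjacent pairs
--     starts_new = [True] + [q - (p + len(s.encode('utf-16le'))) > gap_threshold
--                            for (p, s), (q, _) in zip(items, items[1:])]
--     # phase 2: partition/concatenate according to the boundary flags
--     grouped = []
--     for (_, s), new in zip(items, starts_new):
--         if new:
--             grouped.append(s)
--         else:
--             grouped[-1] += s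
--     return grouped
-- ===== Notes on version B (the rewrite author's own statement) =====
-- stated objective: simpler
-- what changed: A's single stateful loop carrying last_end, a current buffer and deferred joins is replaced by two stateless phases: boundary flags computed from adjacent pairs of the sorted list via zip, then a partition pass that appends or concatenates onto the last group directly.
import Mathlib
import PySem

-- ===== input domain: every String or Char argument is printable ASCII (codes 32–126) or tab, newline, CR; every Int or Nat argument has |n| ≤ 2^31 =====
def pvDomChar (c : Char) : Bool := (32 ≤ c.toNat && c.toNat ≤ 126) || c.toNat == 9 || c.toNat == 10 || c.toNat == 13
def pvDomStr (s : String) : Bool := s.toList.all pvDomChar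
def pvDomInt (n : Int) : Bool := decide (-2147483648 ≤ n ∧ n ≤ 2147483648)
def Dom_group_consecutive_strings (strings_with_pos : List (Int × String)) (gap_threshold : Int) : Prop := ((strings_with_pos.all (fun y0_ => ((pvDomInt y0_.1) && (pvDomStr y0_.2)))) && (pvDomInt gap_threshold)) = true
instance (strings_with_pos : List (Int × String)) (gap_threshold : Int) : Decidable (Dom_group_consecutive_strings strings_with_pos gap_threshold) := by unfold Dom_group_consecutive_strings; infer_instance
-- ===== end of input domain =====

-- B replaces A's single stateful loop (last_end + current buffer + join) by two phases: stateless
-- boundary detection over adjacent sorted pairs, then partitioning by those flags; objective: simpler.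

-- len(s.encode('utf-16le')) : on Dom's ASCII strings every character encodes to exactly 2 bytes,
-- so this equals 2 * len(s); exact on the stated domain. Shared by both ports (both Pythons call it).
def pvUtf16leLen (s : String) : Int := 2 * PySem.Str.len s

-- ===== PORT A =====
def group_consecutive_strings (strings_with_pos : List (Int × String)) (gap_threshold : Int) : List String :=
  if strings_with_pos = [] then [] else
  match PySem.List.sorted strings_with_pos (fun x => x.1) with
  | [] => []   -- unreachable: sorted of a nonempty list is nonempty
  | (p0, s0) :: rest =>
    -- state = (grouped, current, last_end)
    let st := rest.foldl
      (fun (st : List String × List String × Int) ps =>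
        if ps.1 - st.2.2 ≤ gap_threshold then
          (st.1, st.2.1 ++ [ps.2], ps.1 + pvUtf16leLen ps.2)
        else
          (st.1 ++ [PySem.Str.join "" st.2.1], [ps.2], ps.1 + pvUtf16leLen ps.2))
      ([], [s0], p0 + pvUtf16leLen s0)
    st.1 ++ [PySem.Str.join "" st.2.1]

-- ===== PORT B =====
def group_consecutive_strings_alt (strings_with_pos : List (Int × String)) (gap_threshold : Int) : List String :=
  let items := PySem.List.sorted strings_with_pos (fun x => x.1)
  -- phase 1: starts_new = [True] + [q - (p + utf16len s) > gap for (p,s),(q,_) in zip(items, items[1:])]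
  let startsNew : List Bool :=
    true :: List.zipWith (fun a b : Int × String => decide (gap_threshold < b.1 - (a.1 + pvUtf16leLen a.2))) items items.tail
  -- phase 2: partition/concatenate according to the flags (grouped[-1] += s; getD "" is the
  -- totalising default, never reached since the first flag is always true)
  (items.zip startsNew).foldl
    (fun grouped x =>
      if x.2 then grouped ++ [x.1.2]
      else grouped.dropLast ++ [(grouped.getLast?.getD "") ++ x.1.2]) []

-- ===== PRECONDITION & SPEC =====
def Spec_group_consecutive_strings (strings_with_pos : List (Int × String)) (gap_threshold : Int) (out : List String) : Prop := out = group_consecutive_strings_alt strings_with_pos gap_threshold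
instance (strings_with_pos : List (Int × String)) (gap_threshold : Int) (out : List String) : Decidable (Spec_group_consecutive_strings strings_with_pos gap_threshold out) := by unfold Spec_group_consecutive_strings; infer_instance

-- ===== CLAIM (what is proved, stated in full; the proofs are below) =====
def Claim_equal_group_consecutive_strings : Prop := ∀ (strings_with_pos : List (Int × String)) (gap_threshold : Int), Dom_group_consecutive_strings strings_with_pos gap_threshold → Spec_group_consecutive_strings strings_with_pos gap_threshold (group_consecutive_strings strings_with_pos gap_threshold)

-- ===== LEMMAS AND PROOFS =====

lemma pv_intercalate_nil (l : List (List Char)) : List.intercalate [] l = l.flatten := by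
  unfold List.intercalate
  induction l with
  | nil => simp
  | cons a t ih =>
    cases t with
    | nil => simp
    | cons b u => simp only [List.intersperse_cons₂, List.flatten_cons] at *; simp [ih]

lemma pvJoin_append (c : List String) (s : String) :
    PySem.Str.join "" (c ++ [s]) = PySem.Str.join "" c ++ s := by
  apply String.toList_inj.mp
  simp [PySem.Str.toList_join, PySem.Chars.join, String.toList_append, pv_intercalate_nil]

lemma pvJoin_singleton (s : String) : PySem.Str.join "" [s] = s := by
  apply String.toList_inj.mp
  simp [PySem.Str.toList_join, PySem.Chars.join, pv_intercalate_nil]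

-- the loop invariant: A's fold (with the previous element's end as last_end) followed by the
-- final flush equals B's flag-driven fold started on the already-flushed prefix
lemma pv_main (gap_threshold : Int) :
    ∀ (tl : List (Int × String)) (prev : Int × String) (g c : List String),
    (let st := tl.foldl
        (fun (st : List String × List String × Int) ps =>
          if ps.1 - st.2.2 ≤ gap_threshold then
            (st.1, st.2.1 ++ [ps.2], ps.1 + pvUtf16leLen ps.2)
          else
            (st.1 ++ [PySem.Str.join "" st.2.1], [ps.2], ps.1 + pvUtf16leLen ps.2))
        (g, c, prev.1 + pvUtf16leLen prev.2)
     st.1 ++ [PySem.Str.join "" st.2.1])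
    = (tl.zip (List.zipWith (fun a b : Int × String => decide (gap_threshold < b.1 - (a.1 + pvUtf16leLen a.2))) (prev :: tl) tl)).foldl
        (fun grouped x =>
          if x.2 then grouped ++ [x.1.2]
          else grouped.dropLast ++ [(grouped.getLast?.getD "") ++ x.1.2]) (g ++ [PySem.Str.join "" c]) := by
  intro tl
  induction tl with
  | nil => intro prev g c; simp
  | cons x rest ih =>
    intro prev g c
    by_cases h : x.1 - (prev.1 + pvUtf16leLen prev.2) ≤ gap_threshold
    · have hflag : decide (gap_threshold < x.1 - (prev.1 + pvUtf16leLen prev.2)) = false := by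
        simp; omega
      simp only [List.zipWith, List.zip, List.foldl_cons, hflag, if_pos h, Bool.false_eq_true, if_false]
      have := ih x g (c ++ [x.2])
      simp only [List.zip] at this
      rw [List.dropLast_concat, List.getLast?_concat]
      simpa [pvJoin_append] using this
    · have hflag : decide (gap_threshold < x.1 - (prev.1 + pvUtf16leLen prev.2)) = true := by
        simp; omega
      simp only [List.zipWith, List.zip, List.foldl_cons, hflag, if_neg h]
      have := ih x (g ++ [PySem.Str.join "" c]) [x.2]
      simp only [List.zip] at this
      simpa [pvJoin_singleton] using this

-- ===== VERDICT (by name: the statement is the Claim_ definition above) =====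
theorem group_consecutive_strings_spec : Claim_equal_group_consecutive_strings := by
  intro swp gap _
  unfold Spec_group_consecutive_strings group_consecutive_strings group_consecutive_strings_alt
  by_cases hnil : swp = []
  · subst hnil; simp [PySem.List.sorted]
  · rw [if_neg hnil]
    have hs : PySem.List.sorted swp (fun x => x.1) ≠ [] := by
      simp [PySem.List.sorted_eq_nil_iff, hnil]
    cases hl : PySem.List.sorted swp (fun x => x.1) with
    | nil => exact absurd hl hs
    | cons hd tl =>
      obtain ⟨p0, s0⟩ := hd
      have := pv_main gap tl (p0, s0) [] [s0]
      simp only [List.nil_append] at this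
      simpa [List.zip, List.zipWith, List.foldl_cons, pvJoin_singleton] using this
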